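-- pv_equiv track=rewrite | github.com/itslucyax/Editor-Codigo-Python | editor/vbs_validator.py | format_problemas
-- ===== SOURCE A (Python) =====
-- from typing import List, Tuple
--
-- def format_problemas(problemas: List[Tuple[str, str, int]]) -> str:
--     """
--     Formatea la lista de problemas en un texto legible para mostrar en un diálogo.
--
--     Returns:
--         Texto formateado con los problemas.
--     """
--     if not problemas:
--         return ""
--
--     errores = [p for p in problemas if p[0] == "error"]
--     avisos = [p for p in problemas if p[0] == "aviso"]
--
--     parts = []
--
--     if errores:
--         parts.append(f"  ERRORES ({len(errores)}):")
--         for _, msg, linea in errores: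
--             loc = f" (línea {linea})" if linea > 0 else ""
--             parts.append(f"    ✗ {msg}{loc}")
--
--     if avisos:
--         parts.append(f"\n  AVISOS ({len(avisos)}):")
--         for _, msg, linea in avisos:
--             loc = f" (línea {linea})" if linea > 0 else ""
--             parts.append(f"    ⚠ {msg}{loc}")
--
--     return "\n".join(parts)
-- ===== SOURCE B (Python) =====
-- from typing import List, Tuple
--
-- def format_problemas(problemas: List[Tuple[str, str, int]]) -> str:
--     if not problemas:
--         return ""
--     ORDER = {"error": 0, "aviso": 1}
--     HEADERS = {"error": ("  ERRORES", "\u2717"), "aviso": ("\n  AVISOS", "\u26a0")}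
--     relevant = sorted([p for p in problemas if p[0] in ORDER], key=lambda p: ORDER[p[0]])
--     parts = []
--     i, n = 0, len(relevant)
--     while i < n:
--         kind = relevant[i][0]
--         j = i
--         while j < n and relevant[j][0] == kind:
--             j += 1
--         header, symbol = HEADERS[kind]
--         parts.append(f"{header} ({j - i}):")
--         for _, msg, linea in relevant[i:j]:
--             loc = f" (línea {linea})" if linea > 0 else ""
--             parts.append(f"    {symbol} {msg}{loc}")
--         i = j
--     return "\n".join(parts)
-- ===== Notes on version B (the rewrite author's own statement) =====
-- stated objective: alternative
-- what changed: B stably sorts the relevant items by a rank dict (error=0, aviso=1) and then emits sections with a single run-scanning loop (header per run of equal kinds), instead of A's two filter passes with two hard-coded formatting blocks.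
import Mathlib
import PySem

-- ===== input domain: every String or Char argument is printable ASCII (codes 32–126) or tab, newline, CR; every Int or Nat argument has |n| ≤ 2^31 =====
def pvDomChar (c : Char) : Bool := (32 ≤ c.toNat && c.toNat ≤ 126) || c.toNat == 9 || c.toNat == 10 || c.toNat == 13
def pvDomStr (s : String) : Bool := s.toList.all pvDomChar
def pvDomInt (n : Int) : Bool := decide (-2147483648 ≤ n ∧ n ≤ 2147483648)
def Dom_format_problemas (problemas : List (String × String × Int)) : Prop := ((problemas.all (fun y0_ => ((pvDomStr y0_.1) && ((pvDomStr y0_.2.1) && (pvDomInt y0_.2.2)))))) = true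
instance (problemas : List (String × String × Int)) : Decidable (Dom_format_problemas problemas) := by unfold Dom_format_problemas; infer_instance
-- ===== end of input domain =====

-- B stably sorts the relevant items by a rank dict and emits sections by one
-- run-scanning loop, instead of A's two filter passes with duplicated blocks
-- (alternative algorithm; return value identical).

-- ===== PORT A =====
def format_problemas (problemas : List (String × String × Int)) : String :=
  if problemas.isEmpty then "" else
  let errores := problemas.filter (fun p => p.1 == "error")
  let avisos := problemas.filter (fun p => p.1 == "aviso")
  let parts : List String := []
  let parts :=
    if !errores.isEmpty then
      errores.foldl (fun acc p =>
        let loc := if p.2.2 > 0 then " (línea " ++ PySem.Int.toStr p.2.2 ++ ")" else ""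
        acc ++ ["    ✗ " ++ p.2.1 ++ loc])
        (parts ++ ["  ERRORES (" ++ PySem.Int.toStr (errores.length : Int) ++ "):"])
    else parts
  let parts :=
    if !avisos.isEmpty then
      avisos.foldl (fun acc p =>
        let loc := if p.2.2 > 0 then " (línea " ++ PySem.Int.toStr p.2.2 ++ ")" else ""
        acc ++ ["    ⚠ " ++ p.2.1 ++ loc])
        (parts ++ ["\n  AVISOS (" ++ PySem.Int.toStr (avisos.length : Int) ++ "):"])
    else parts
  PySem.Str.join "\n" parts

-- ===== PORT B =====
-- rank dict ORDER = {"error": 0, "aviso": 1}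
def pvOrderB : PySem.Dict String Int := PySem.Dict.ofList [("error", 0), ("aviso", 1)]
-- HEADERS = {"error": ("  ERRORES","✗"), "aviso": ("\n  AVISOS","⚠")}
def pvHeadersB : PySem.Dict String (String × String) :=
  PySem.Dict.ofList [("error", ("  ERRORES", "✗")), ("aviso", ("\n  AVISOS", "⚠"))]

-- the while loops: scan runs of equal kinds, emitting a header then the run's lines
def pvRunsB : List (String × String × Int) → List String
  | [] => []
  | p :: rest =>
    let grp := p :: rest.takeWhile (fun q => q.1 == p.1)
    let rest' := rest.dropWhile (fun q => q.1 == p.1)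
    let hs := pvHeadersB.getD p.1 ("", "")
    (hs.1 ++ " (" ++ PySem.Int.toStr (grp.length : Int) ++ "):")
      :: (grp.map (fun q =>
            let loc := if q.2.2 > 0 then " (línea " ++ PySem.Int.toStr q.2.2 ++ ")" else ""
            "    " ++ hs.2 ++ " " ++ q.2.1 ++ loc)
          ++ pvRunsB rest')
  termination_by l => l.length
  decreasing_by
    simp only [List.length_cons]
    exact Nat.lt_succ_of_le (List.length_dropWhile_le _ _)

def format_problemas_alt (problemas : List (String × String × Int)) : String :=
  if problemas.isEmpty then "" else
  let relevant := PySem.List.sorted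
    (problemas.filter (fun p => pvOrderB.contains p.1))
    (fun p => pvOrderB.getD p.1 0) false
  PySem.Str.join "\n" (pvRunsB relevant)

-- ===== PRECONDITION & SPEC =====
def Spec_format_problemas (problemas : List (String × String × Int)) (out : String) : Prop := out = format_problemas_alt problemas
instance (problemas : List (String × String × Int)) (out : String) : Decidable (Spec_format_problemas problemas out) := by unfold Spec_format_problemas; infer_instance

-- ===== CLAIM (what is proved, stated in full; the proofs are below) =====
def Claim_equal_format_problemas : Prop := ∀ (problemas : List (String × String × Int)), Dom_format_problemas problemas → Spec_format_problemas problemas (format_problemas problemas)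

-- ===== LEMMAS AND PROOFS =====

-- appending-foldl is a map
theorem foldl_push {α : Type} (f : α → String) (l : List α) (init : List String) :
    l.foldl (fun acc p => acc ++ [f p]) init = init ++ l.map f := by
  induction l generalizing init with
  | nil => simp
  | cons x t ih => simp [ih]

-- insertBy skips a prefix it is not inserted into
theorem insertBy_append_skip {α : Type} (before : α → α → Bool) (x : α)
    (e a : List α) (h : ∀ y ∈ e, before x y = false) :
    PySem.List.insertBy before x (e ++ a) = e ++ PySem.List.insertBy before x a := by
  induction e with
  | nil => simp
  | cons y t ih =>
    simp only [List.cons_append, PySem.List.insertBy, h y (by simp)]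
    simp only [Bool.false_eq_true, if_false, List.cons.injEq, true_and]
    exact ih (fun z hz => h z (by simp [hz]))

-- insertBy at the very front when it goes before everything
theorem insertBy_front {α : Type} (before : α → α → Bool) (x : α)
    (a : List α) (h : ∀ y ∈ a, before x y = true) :
    PySem.List.insertBy before x a = x :: a := by
  cases a with
  | nil => simp [PySem.List.insertBy]
  | cons y t => simp [PySem.List.insertBy, h y (by simp)]

-- the insertion-sort fold over a two-valued key = filter 0 ++ filter 1
theorem foldl_insertBy_two {α : Type} (k : α → Int) (l e a : List α)
    (he : ∀ y ∈ e, k y = 0) (ha : ∀ y ∈ a, k y = 1)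
    (hl : ∀ x ∈ l, k x = 0 ∨ k x = 1) :
    l.foldl (fun acc x => PySem.List.insertBy (fun p q => decide (k p < k q)) x acc) (e ++ a)
      = (e ++ l.filter (fun x => k x == 0)) ++ (a ++ l.filter (fun x => k x == 1)) := by
  induction l generalizing e a with
  | nil => simp
  | cons x t ih =>
    simp only [List.foldl_cons, List.filter_cons]
    rcases hl x (by simp) with h0 | h1
    · have : PySem.List.insertBy (fun p q => decide (k p < k q)) x (e ++ a)
          = (e ++ [x]) ++ a := by
        rw [insertBy_append_skip _ _ _ _ (fun y hy => by simp [he y hy, h0]),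
            insertBy_front _ _ _ (fun y hy => by simp [ha y hy, h0])]
        simp
      rw [this, ih (e ++ [x]) a
            (fun y hy => by
              rcases List.mem_append.mp hy with h | h
              · exact he y h
              · rw [List.mem_singleton] at h; rw [h]; exact h0)
            ha (fun y hy => hl y (by simp [hy]))]
      simp [h0]
    · have : PySem.List.insertBy (fun p q => decide (k p < k q)) x (e ++ a)
          = e ++ (a ++ [x]) := by
        rw [show e ++ (a ++ [x]) = (e ++ a) ++ [x] by simp]
        apply PySem.List.insertBy_of_forall_not_before
        intro y hy
        rcases List.mem_append.mp hy with h | h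
        · simp [he y h, h1]
        · simp [ha y h, h1]
      rw [this, ih e (a ++ [x]) he
            (fun y hy => by
              rcases List.mem_append.mp hy with h | h
              · exact ha y h
              · rw [List.mem_singleton] at h; rw [h]; exact h1)
            (fun y hy => hl y (by simp [hy]))]
      simp [h1]

theorem takeWhile_all_append {α : Type} (p : α → Bool) (xs ys : List α)
    (hx : ∀ x ∈ xs, p x = true) (hy : ∀ y ∈ ys, p y = false) :
    (xs ++ ys).takeWhile p = xs := by
  induction xs with
  | nil => cases ys with
    | nil => simp
    | cons y t => simp [hy y (by simp)]
  | cons x t ih =>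
    simp [hx x (by simp), ih (fun z hz => hx z (by simp [hz]))]

theorem dropWhile_all_append {α : Type} (p : α → Bool) (xs ys : List α)
    (hx : ∀ x ∈ xs, p x = true) (hy : ∀ y ∈ ys, p y = false) :
    (xs ++ ys).dropWhile p = ys := by
  induction xs with
  | nil => cases ys with
    | nil => simp
    | cons y t => simp [hy y (by simp)]
  | cons x t ih =>
    simp [hx x (by simp), ih (fun z hz => hx z (by simp [hz]))]

-- the literal dicts, evaluated on an arbitrary key
theorem orderB_contains (s : String) :
    pvOrderB.contains s = (s == "error" || s == "aviso") := by
  have h : pvOrderB = PySem.Dict.mk [("error", 0), ("aviso", 1)] := rfl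
  rw [h]
  by_cases h1 : s = "error"
  · simp [h1]
  · by_cases h2 : s = "aviso"
    · simp [h2]
    · have f1 : ("error" == s) = false := beq_eq_false_iff_ne.mpr (fun hh => h1 (Eq.symm hh))
      have f2 : ("aviso" == s) = false := beq_eq_false_iff_ne.mpr (fun hh => h2 (Eq.symm hh))
      have g1 : (s == "error") = false := beq_eq_false_iff_ne.mpr h1
      have g2 : (s == "aviso") = false := beq_eq_false_iff_ne.mpr h2
      simp [f1, f2, g1, g2]

theorem orderB_getD (s : String) :
    pvOrderB.getD s 0 = if s == "error" then 0 else if s == "aviso" then 1 else 0 := by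
  have h : pvOrderB = PySem.Dict.mk [("error", 0), ("aviso", 1)] := rfl
  rw [h]
  by_cases h1 : s = "error"
  · simp [h1, PySem.Dict.getD, PySem.Dict.get?_mk_cons]
  · by_cases h2 : s = "aviso"
    · simp [h2, PySem.Dict.getD, PySem.Dict.get?_mk_cons]
    · have e1 : ¬ ("error" = s) := fun hh => h1 (Eq.symm hh)
      have e2 : ¬ ("aviso" = s) := fun hh => h2 (Eq.symm hh)
      simp [h1, h2, e1, e2, PySem.Dict.getD, PySem.Dict.get?]

-- a two-valued-key stable sort is filter 0 ++ filter 1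
theorem sorted_two {α : Type} (l : List α) (k : α → Int)
    (hl : ∀ x ∈ l, k x = 0 ∨ k x = 1) :
    PySem.List.sorted l k false
      = l.filter (fun x => k x == 0) ++ l.filter (fun x => k x == 1) := by
  rw [PySem.List.sorted_eq_foldl_insertBy]
  simpa using foldl_insertBy_two k l [] [] (by simp) (by simp) hl

-- the run scan over "errores ++ avisos" yields exactly A's two blocks
theorem pvRunsB_nil : pvRunsB [] = [] := by simp [pvRunsB]

theorem runsB_split (E A : List (String × String × Int))
    (he : ∀ p ∈ E, p.1 = "error") (ha : ∀ p ∈ A, p.1 = "aviso") :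
    pvRunsB (E ++ A)
      = (if !E.isEmpty then
           ("  ERRORES (" ++ PySem.Int.toStr (E.length : Int) ++ "):")
             :: E.map (fun p =>
                  "    ✗ " ++ p.2.1 ++
                    (if p.2.2 > 0 then " (línea " ++ PySem.Int.toStr p.2.2 ++ ")" else ""))
         else [])
        ++ (if !A.isEmpty then
              ("\n  AVISOS (" ++ PySem.Int.toStr (A.length : Int) ++ "):")
                :: A.map (fun p =>
                     "    ⚠ " ++ p.2.1 ++
                       (if p.2.2 > 0 then " (línea " ++ PySem.Int.toStr p.2.2 ++ ")" else ""))
            else []) := by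
  have havisos : pvRunsB A
      = (if !A.isEmpty then
            ("\n  AVISOS (" ++ PySem.Int.toStr (A.length : Int) ++ "):")
              :: A.map (fun p =>
                   "    ⚠ " ++ p.2.1 ++
                     (if p.2.2 > 0 then " (línea " ++ PySem.Int.toStr p.2.2 ++ ")" else ""))
          else []) := by
    cases A with
    | nil => simp [pvRunsB]
    | cons a as =>
      rw [pvRunsB]
      have ha1 : a.1 = "aviso" := ha a (by simp)
      have htk : as.takeWhile (fun q => q.1 == "aviso") = as := by
        simpa using takeWhile_all_append (fun q => q.1 == "aviso") as []
          (fun x hx => by simp [ha x (by simp [hx])]) (by simp)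
      have hdk : as.dropWhile (fun q => q.1 == "aviso") = [] := by
        simpa using dropWhile_all_append (fun q => q.1 == "aviso") as []
          (fun x hx => by simp [ha x (by simp [hx])]) (by simp)
      simp only [ha1]
      rw [htk, hdk, pvRunsB_nil]
      simp [show pvHeadersB.getD "aviso" ("", "") = ("\n  AVISOS", "⚠") from rfl,
            show ("\n  AVISOS" ++ " (" : String) = "\n  AVISOS (" from rfl]
  cases E with
  | nil => simpa using havisos
  | cons e es =>
    rw [List.cons_append, pvRunsB]
    have he1 : e.1 = "error" := he e (by simp)
    have htk : (es ++ A).takeWhile (fun q => q.1 == "error") = es :=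
      takeWhile_all_append _ es A
        (fun x hx => by simp [he x (by simp [hx])])
        (fun y hy => by simp [ha y hy])
    have hdk : (es ++ A).dropWhile (fun q => q.1 == "error") = A :=
      dropWhile_all_append _ es A
        (fun x hx => by simp [he x (by simp [hx])])
        (fun y hy => by simp [ha y hy])
    simp only [he1]
    rw [htk, hdk, havisos]
    simp [show pvHeadersB.getD "error" ("", "") = ("  ERRORES", "✗") from rfl,
          show ("  ERRORES" ++ " (" : String) = "  ERRORES (" from rfl]

-- ===== VERDICT (by name: the statement is the Claim_ definition above) =====
theorem format_problemas_spec : Claim_equal_format_problemas := by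
  intro problemas _
  unfold Spec_format_problemas format_problemas format_problemas_alt
  by_cases h : problemas.isEmpty
  · simp [h]
  · simp only [h, if_false, Bool.false_eq_true]
    have hE : ∀ p ∈ problemas.filter (fun p => p.1 == "error"), p.1 = "error" := by
      intro p hp; simpa using (List.mem_filter.mp hp).2
    have hA : ∀ p ∈ problemas.filter (fun p => p.1 == "aviso"), p.1 = "aviso" := by
      intro p hp; simpa using (List.mem_filter.mp hp).2
    have hl : ∀ x ∈ problemas.filter (fun p => pvOrderB.contains p.1),
        pvOrderB.getD x.1 0 = 0 ∨ pvOrderB.getD x.1 0 = 1 := by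
      intro x hx
      have hc := (List.mem_filter.mp hx).2
      rw [orderB_contains] at hc
      rcases Bool.or_eq_true_iff.mp hc with h' | h' <;>
        simp [orderB_getD, beq_iff_eq.mp h']
    rw [sorted_two _ _ hl]
    have hfe : (problemas.filter (fun p => pvOrderB.contains p.1)).filter
          (fun x => pvOrderB.getD x.1 0 == 0)
        = problemas.filter (fun p => p.1 == "error") := by
      rw [List.filter_filter]
      apply List.filter_congr
      intro x _
      by_cases h1 : x.1 = "error"
      · simp [orderB_getD, orderB_contains, h1]
      · by_cases h2 : x.1 = "aviso" <;>
          simp [orderB_getD, orderB_contains, h1, h2]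
    have hfa : (problemas.filter (fun p => pvOrderB.contains p.1)).filter
          (fun x => pvOrderB.getD x.1 0 == 1)
        = problemas.filter (fun p => p.1 == "aviso") := by
      rw [List.filter_filter]
      apply List.filter_congr
      intro x _
      by_cases h1 : x.1 = "error"
      · simp [orderB_getD, orderB_contains, h1]
      · by_cases h2 : x.1 = "aviso" <;>
          simp [orderB_getD, orderB_contains, h1, h2]
    rw [hfe, hfa, runsB_split _ _ hE hA]
    simp only [foldl_push]
    split_ifs <;> simp
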